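-- pv_equiv track=rewrite | github.com/DevXT-LLC/convertanything | convertanything/__init__.py | remap_fields
-- ===== SOURCE A (Python) =====
-- from typing import Type, get_args, get_origin, Union, List
--
-- def remap_fields(converted_data: dict, data: List[dict]) -> List[dict]:
--     mapped_list = []
--     for info in data:
--         new_data = {}
--         for key, value in converted_data.items():
--             item = [k for k, v in data[0].items() if v == value]
--             if item:
--                 new_data[key] = info[item[0]]
--         mapped_list.append(new_data)
--     return mapped_list
-- ===== SOURCE B (Python) =====
-- def remap_fields(converted_data: dict, data):
--     if not data:
--         return []
--     first = data[0]
--     mapping = {}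
--     for out_key, value in converted_data.items():
--         src = next((k for k, v in first.items() if v == value), None)
--         if src is not None:
--             mapping[out_key] = src
--     return [{ok: row[sk] for ok, sk in mapping.items()} for row in data]
-- ===== Notes on version B (the rewrite author's own statement) =====
-- stated objective: simpler
-- what changed: B builds the source-key mapping from data[0] once up front and then projects every row through it in a single comprehension, instead of A's per-row rescan of converted_data and data[0] inside the row loop.
import Mathlib
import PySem

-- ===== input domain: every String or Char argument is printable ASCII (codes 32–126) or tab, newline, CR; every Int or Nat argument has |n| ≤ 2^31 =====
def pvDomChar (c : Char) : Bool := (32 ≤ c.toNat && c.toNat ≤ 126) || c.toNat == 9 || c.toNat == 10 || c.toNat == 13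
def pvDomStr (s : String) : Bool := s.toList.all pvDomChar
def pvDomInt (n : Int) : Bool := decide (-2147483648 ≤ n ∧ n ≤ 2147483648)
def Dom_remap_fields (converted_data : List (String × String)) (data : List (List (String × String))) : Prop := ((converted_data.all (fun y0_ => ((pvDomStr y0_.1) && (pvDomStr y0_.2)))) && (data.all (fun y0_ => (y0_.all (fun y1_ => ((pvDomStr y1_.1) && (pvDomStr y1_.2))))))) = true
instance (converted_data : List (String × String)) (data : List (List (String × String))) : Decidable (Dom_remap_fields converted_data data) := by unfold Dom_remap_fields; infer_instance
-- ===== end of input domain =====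

-- B builds the source-key mapping from data[0] once and projects each row through it, instead of A's per-row rescan; objective: simpler.

-- ===== PORT A =====
-- literal transliteration of A; info[item[0]] is a dict subscript (KeyError inputs are excluded by Pre_,
-- the port reads it with default ""); data[0] appears as data.headD [] (only reached when data ≠ []).
def remap_fields (converted_data : List (String × String)) (data : List (List (String × String))) : List (List (String × String)) :=
  data.foldl (fun mapped_list info =>
    let new_data :=
      converted_data.foldl (fun new_data kv =>
        let item := ((data.headD []).filter (fun p => p.2 == kv.2)).map Prod.fst
        match item with
        | [] => new_data
        | k :: _ => new_data.insert kv.1 ((PySem.Dict.mk info).getD k "")) (PySem.Dict.mk [])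
    mapped_list ++ [new_data.items]) []

-- ===== PORT B =====
-- literal transliteration of B (Source B): empty guard, build `mapping` once from data[0], then project rows.
def remap_fields_alt (converted_data : List (String × String)) (data : List (List (String × String))) : List (List (String × String)) :=
  match data with
  | [] => []
  | first :: _ =>
    let mapping :=
      converted_data.foldl (fun m kv =>
        match first.find? (fun p => p.2 == kv.2) with
        | some p => m.insert kv.1 p.1
        | none => m) (PySem.Dict.mk [])
    data.map (fun row =>
      (mapping.items.foldl (fun nd sk => nd.insert sk.1 ((PySem.Dict.mk row).getD sk.2 "")) (PySem.Dict.mk [])).items)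

-- ===== PRECONDITION & SPEC =====
-- Pre_ excludes exactly the inputs where Python A raises KeyError: a converted value matched in data[0]
-- but the matched source key is missing from some row.
def Pre_remap_fields (converted_data : List (String × String)) (data : List (List (String × String))) : Prop :=
  ∀ info ∈ data, ∀ kv ∈ converted_data,
    ∀ p ∈ (data.headD []).find? (fun q => q.2 == kv.2), p.1 ∈ info.map Prod.fst
instance (converted_data : List (String × String)) (data : List (List (String × String))) : Decidable (Pre_remap_fields converted_data data) := by unfold Pre_remap_fields; infer_instance
def pvWitness_remap_fields : (List (String × String)) × (List (List (String × String))) :=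
  ([("a", "1")], [[("k", "1")], [("k", "2")]])
def Spec_remap_fields (converted_data : List (String × String)) (data : List (List (String × String))) (out : List (List (String × String))) : Prop := out = remap_fields_alt converted_data data
instance (converted_data : List (String × String)) (data : List (List (String × String))) (out : List (List (String × String))) : Decidable (Spec_remap_fields converted_data data out) := by unfold Spec_remap_fields; infer_instance

-- ===== CLAIM (what is proved, stated in full; the proofs are below) =====
def Claim_equal_remap_fields : Prop := ∀ (converted_data : List (String × String)) (data : List (List (String × String))), Dom_remap_fields converted_data data → Pre_remap_fields converted_data data → Spec_remap_fields converted_data data (remap_fields converted_data data)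

-- ===== LEMMAS AND PROOFS =====

theorem pv_find?_eq_head?_filter {α : Type} (l : List α) (q : α → Bool) :
    l.find? q = (l.filter q).head? :=
  List.head?_filter.symm

theorem pv_contains_mk_map (l : List (String × String)) (F : String → String) (k : String) :
    (PySem.Dict.mk (l.map (fun p => (p.1, F p.2)))).contains k = (PySem.Dict.mk l).contains k := by
  simp only [PySem.Dict.contains_mk, List.any_map]
  rfl

theorem pv_insert_mk_map (d : PySem.Dict String String) (k s : String) (F : String → String) :
    (PySem.Dict.mk (d.items.map (fun p => (p.1, F p.2)))).insert k (F s)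
      = PySem.Dict.mk ((d.insert k s).items.map (fun p => (p.1, F p.2))) := by
  apply PySem.Dict.ext
  have hc : (PySem.Dict.mk (d.items.map (fun p => (p.1, F p.2)))).contains k = d.contains k :=
    pv_contains_mk_map d.items F k
  rw [PySem.Dict.items_insert, PySem.Dict.items_insert, hc]
  by_cases h : d.contains k = true
  · rw [if_pos h, if_pos h]
    dsimp only
    rw [List.map_map, List.map_map]
    apply List.map_congr_left
    intro p _
    by_cases hp : p.1 == k <;> simp [Function.comp, hp]
  · rw [if_neg h, if_neg h]
    dsimp only
    simp

theorem pv_nodup_build (first : List (String × String)) (cd : List (String × String))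
    (m : PySem.Dict String String) (hm : m.keys.Nodup) :
    (cd.foldl (fun m kv =>
        match first.find? (fun p => p.2 == kv.2) with
        | some p => m.insert kv.1 p.1
        | none => m) m).keys.Nodup := by
  induction cd generalizing m with
  | nil => exact hm
  | cons kv cd ih =>
    simp only [List.foldl_cons]
    cases h : first.find? (fun p => p.2 == kv.2) with
    | none => exact ih m hm
    | some p => exact ih _ (PySem.Dict.nodup_keys_insert _ _ _ hm)

theorem pv_main (F : String → String) (first : List (String × String))
    (cd : List (String × String)) (m : PySem.Dict String String) :
    cd.foldl (fun nd kv =>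
        match first.find? (fun p => p.2 == kv.2) with
        | some p => nd.insert kv.1 (F p.1)
        | none => nd) (PySem.Dict.mk (m.items.map (fun p => (p.1, F p.2))))
      = PySem.Dict.mk ((cd.foldl (fun m kv =>
          match first.find? (fun p => p.2 == kv.2) with
          | some p => m.insert kv.1 p.1
          | none => m) m).items.map (fun p => (p.1, F p.2))) := by
  induction cd generalizing m with
  | nil => rfl
  | cons kv cd ih =>
    simp only [List.foldl_cons]
    cases h : first.find? (fun p => p.2 == kv.2) with
    | none => exact ih m
    | some p => dsimp only; rw [pv_insert_mk_map]; exact ih _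

theorem pv_apply_items (F : String → String) (l : List (String × String))
    (hnd : (l.map Prod.fst).Nodup) (nd : PySem.Dict String String)
    (hd : ∀ p ∈ l, nd.contains p.1 = false) :
    (l.foldl (fun nd sk => nd.insert sk.1 (F sk.2)) nd).items
      = nd.items ++ l.map (fun p => (p.1, F p.2)) := by
  induction l generalizing nd with
  | nil => simp
  | cons p l ih =>
    simp only [List.map_cons, List.nodup_cons] at hnd
    have hp : nd.contains p.1 = false := hd p (List.mem_cons_self)
    have hstep : (nd.insert p.1 (F p.2)).items = nd.items ++ [(p.1, F p.2)] := by
      rw [PySem.Dict.items_insert, if_neg]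
      simp [hp]
    have hd' : ∀ q ∈ l, (nd.insert p.1 (F p.2)).contains q.1 = false := by
      intro q hq
      rw [PySem.Dict.contains_insert]
      have h1 : (q.1 == p.1) = false := by
        simp only [beq_eq_false_iff_ne, ne_eq]
        intro he
        exact hnd.1 (he ▸ List.mem_map_of_mem hq)
      simp [h1, hd q (List.mem_cons_of_mem _ hq)]
    simp only [List.foldl_cons]
    rw [ih hnd.2 _ hd', hstep]
    simp

theorem pv_row (F : String → String) (first : List (String × String))
    (cd : List (String × String)) :
    (cd.foldl (fun nd kv =>
        match ((first.filter (fun p => p.2 == kv.2)).map Prod.fst) with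
        | [] => nd
        | k :: _ => nd.insert kv.1 (F k)) (PySem.Dict.mk [])).items
      = ((cd.foldl (fun m kv =>
          match first.find? (fun p => p.2 == kv.2) with
          | some p => m.insert kv.1 p.1
          | none => m) (PySem.Dict.mk [])).items.foldl
            (fun nd sk => nd.insert sk.1 (F sk.2)) (PySem.Dict.mk [])).items := by
  have hfn : (fun (nd : PySem.Dict String String) (kv : String × String) =>
      match ((first.filter (fun p => p.2 == kv.2)).map Prod.fst) with
      | [] => nd
      | k :: _ => nd.insert kv.1 (F k))
      = (fun (nd : PySem.Dict String String) (kv : String × String) =>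
      match first.find? (fun p => p.2 == kv.2) with
      | some p => nd.insert kv.1 (F p.1)
      | none => nd) := by
    funext nd kv
    cases hf : first.find? (fun p => p.2 == kv.2) with
    | none =>
      have hnil : first.filter (fun p => p.2 == kv.2) = [] := by
        rw [List.filter_eq_nil_iff]
        intro a ha
        exact List.find?_eq_none.mp hf a ha
      simp [hnil]
    | some p =>
      have h2 : (first.filter (fun p => p.2 == kv.2)).head? = some p := by
        rw [← pv_find?_eq_head?_filter, hf]
      obtain ⟨t, ht⟩ := List.head?_eq_some_iff.mp h2
      simp [ht]
  rw [hfn]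
  have hmain := pv_main F first cd (PySem.Dict.mk [])
  simp only [List.map_nil] at hmain
  rw [hmain]
  have hkeys : (((cd.foldl (fun m kv =>
      match first.find? (fun p => p.2 == kv.2) with
      | some p => m.insert kv.1 p.1
      | none => m) (PySem.Dict.mk [])).items).map Prod.fst).Nodup := by
    have := pv_nodup_build first cd (PySem.Dict.mk []) (by simp [PySem.Dict.keys])
    simpa [PySem.Dict.keys] using this
  rw [pv_apply_items F _ hkeys (PySem.Dict.mk [])
    (by intro p _; simp [PySem.Dict.contains_mk])]
  simp

-- ===== VERDICT (by name: the statement is the Claim_ definition above) =====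
theorem remap_fields_spec : Claim_equal_remap_fields := by
  intro cd data _ _
  unfold Spec_remap_fields remap_fields remap_fields_alt
  cases data with
  | nil => rfl
  | cons first rest =>
    simp only [List.headD_cons]
    rw [PySem.List.foldl_append_singleton_eq_map]
    simp only [List.nil_append]
    apply List.map_congr_left
    intro info _
    exact pv_row (fun k => (PySem.Dict.mk info).getD k "") first cd
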